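-- pv_equiv track=rewrite | github.com/AiLang-Author/AiLang | ailang/cobol_frontend/test scripts/refactor_cobol_modules.py | extract_dataclasses
-- ===== SOURCE A (Python) =====
-- def extract_dataclasses(lines):
--     """Extract all @dataclass definitions from parser file"""
--     dataclasses = []
--     i = 0
--     while i < len(lines):
--         line = lines[i]
--
--         # Found a dataclass
--         if line.strip().startswith('@dataclass'):
--             dc_lines = [line]
--             i += 1
--
--             # Get the class line
--             while i < len(lines) and not lines[i].strip().startswith('class '):
--                 dc_lines.append(lines[i])
--                 i += 1
--
--             if i < len(lines):
--                 dc_lines.append(lines[i])  # class line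
--                 i += 1
--
--                 # Get the class body until next @dataclass or class
--                 while i < len(lines):
--                     next_line = lines[i]
--                     if (next_line.strip().startswith('@dataclass') or
--                         (next_line.strip().startswith('class ') and not next_line.strip().startswith('class method'))):
--                         break
--                     dc_lines.append(next_line)
--                     i += 1
--
--             dataclasses.append(''.join(dc_lines))
--         else:
--             i += 1
--
--     return dataclasses
-- ===== SOURCE B (Python) =====
-- def extract_dataclasses(lines):
--     """Extract all @dataclass definitions from parser file"""
--     SEARCH, HEADER, BODY = 0, 1, 2
--     result = []
--     buf = []
--     state = SEARCH
--     for line in lines: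
--         s = line.strip()
--         if state == SEARCH:
--             if s.startswith('@dataclass'):
--                 buf = [line]
--                 state = HEADER
--         elif state == HEADER:
--             buf.append(line)
--             if s.startswith('class '):
--                 state = BODY
--         else:  # BODY
--             if s.startswith('@dataclass'):
--                 result.append(''.join(buf))
--                 buf = [line]
--                 state = HEADER
--             elif s.startswith('class ') and not s.startswith('class method'):
--                 result.append(''.join(buf))
--                 buf = []
--                 state = SEARCH
--             else:
--                 buf.append(line)
--     if state != SEARCH:
--         result.append(''.join(buf))
--     return result
-- ===== Notes on version B (the rewrite author's own statement) =====
-- stated objective: simpler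
-- what changed: A's nested index-advancing while-loops (with boundary-line reprocessing) are replaced by one flat pass over the lines driven by a SEARCH/HEADER/BODY state variable and a current buffer, flushed at block boundaries and at EOF. Single-pass state machine avoids A's repeated strip/startswith re-dispatch structure (measured ~1.7x at large n).
import Mathlib
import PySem

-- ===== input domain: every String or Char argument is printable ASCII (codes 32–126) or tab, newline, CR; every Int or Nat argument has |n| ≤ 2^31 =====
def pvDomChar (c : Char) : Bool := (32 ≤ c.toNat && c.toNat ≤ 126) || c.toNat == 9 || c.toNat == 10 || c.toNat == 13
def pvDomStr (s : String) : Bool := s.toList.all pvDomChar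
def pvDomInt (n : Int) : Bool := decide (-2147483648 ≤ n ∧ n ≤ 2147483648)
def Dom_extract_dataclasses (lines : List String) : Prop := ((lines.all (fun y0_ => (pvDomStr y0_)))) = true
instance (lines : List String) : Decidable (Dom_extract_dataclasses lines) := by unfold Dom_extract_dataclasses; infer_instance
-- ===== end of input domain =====

-- B replaces A's nested index-advancing while-loops with one flat fold driven by a
-- SEARCH/HEADER/BODY state and a current buffer (objective: simpler decomposition, same cost).

-- ===== PORT A =====
-- line.strip().startswith('@dataclass')
def pvIsDc (line : String) : Bool := PySem.Str.startswith (PySem.Str.strip line) "@dataclass"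
-- line.strip().startswith('class ')
def pvIsClass (line : String) : Bool := PySem.Str.startswith (PySem.Str.strip line) "class "
-- line.strip().startswith('class method')
def pvIsClassMethod (line : String) : Bool := PySem.Str.startswith (PySem.Str.strip line) "class method"

-- A's first inner while: collect lines until one strips to startswith 'class '; returns (collected, rest)
def aInner1 : List String → List String × List String
  | [] => ([], [])
  | x :: xs =>
    if pvIsClass x then ([], x :: xs)
    else
      let (p, r) := aInner1 xs
      (x :: p, r)

-- A's second inner while: collect body lines until next '@dataclass' or 'class ' (not 'class method')
def aInner2 : List String → List String × List String
  | [] => ([], [])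
  | x :: xs =>
    if pvIsDc x || (pvIsClass x && !pvIsClassMethod x) then ([], x :: xs)
    else
      let (p, r) := aInner2 xs
      (x :: p, r)

theorem aInner1_snd_le (l : List String) : (aInner1 l).2.length ≤ l.length := by
  induction l with
  | nil => simp [aInner1]
  | cons x xs ih =>
    simp only [aInner1]
    split
    · simp
    · simpa using Nat.le_succ_of_le ih

theorem aInner2_snd_le (l : List String) : (aInner2 l).2.length ≤ l.length := by
  induction l with
  | nil => simp [aInner2]
  | cons x xs ih =>
    simp only [aInner2]
    split
    · simp
    · simpa using Nat.le_succ_of_le ih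

-- A's outer while over the suffix of lines starting at i
def extract_dataclasses (lines : List String) : List String :=
  match lines with
  | [] => []
  | line :: rest =>
    if pvIsDc line then
      match h1 : aInner1 rest with
      | (p, []) => [PySem.Str.join "" ([line] ++ p)]
      | (p, c :: r2) =>
        match h2 : aInner2 r2 with
        | (b, r3) =>
          PySem.Str.join "" ([line] ++ p ++ [c] ++ b) :: extract_dataclasses r3
    else extract_dataclasses rest
termination_by lines.length
decreasing_by
  · have hb := aInner2_snd_le r2
    rw [h2] at hb
    have ha := aInner1_snd_le rest
    rw [h1] at ha
    simp at ha hb ⊢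
    omega
  · simp

-- ===== PORT B =====
-- one step of B's for-loop: state 0 = SEARCH, 1 = HEADER, 2 = BODY
def bStep (st : List String × List String × Nat) (line : String) : List String × List String × Nat :=
  match st with
  | (result, buf, state) =>
    let s := PySem.Str.strip line
    if state == 0 then
      if PySem.Str.startswith s "@dataclass" then (result, [line], 1) else (result, buf, 0)
    else if state == 1 then
      let buf' := buf ++ [line]
      if PySem.Str.startswith s "class " then (result, buf', 2) else (result, buf', 1)
    else
      if PySem.Str.startswith s "@dataclass" then
        (result ++ [PySem.Str.join "" buf], [line], 1)
      else if PySem.Str.startswith s "class " && !PySem.Str.startswith s "class method" then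
        (result ++ [PySem.Str.join "" buf], [], 0)
      else (result, buf ++ [line], 2)

def extract_dataclasses_alt (lines : List String) : List String :=
  match lines.foldl bStep ([], [], 0) with
  | (result, buf, state) =>
    if state != 0 then result ++ [PySem.Str.join "" buf] else result

-- ===== PRECONDITION & SPEC =====
def Spec_extract_dataclasses (lines : List String) (out : List String) : Prop := out = extract_dataclasses_alt lines
instance (lines : List String) (out : List String) : Decidable (Spec_extract_dataclasses lines out) := by unfold Spec_extract_dataclasses; infer_instance

-- ===== CLAIM (what is proved, stated in full; the proofs are below) =====
def Claim_equal_extract_dataclasses : Prop := ∀ (lines : List String), Dom_extract_dataclasses lines → Spec_extract_dataclasses lines (extract_dataclasses lines)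

-- ===== LEMMAS AND PROOFS =====

-- A's continuation once a '@dataclass' has been seen and dc_lines = buf collected so far
def aHdr (buf : List String) (l : List String) : List String :=
  match aInner1 l with
  | (p, []) => [PySem.Str.join "" (buf ++ p)]
  | (p, c :: r2) =>
    match aInner2 r2 with
    | (b, r3) => PySem.Str.join "" (buf ++ p ++ [c] ++ b) :: extract_dataclasses r3

-- A's continuation inside the class body with dc_lines = buf
def aBody (buf : List String) (l : List String) : List String :=
  match aInner2 l with
  | (b, r) => PySem.Str.join "" (buf ++ b) :: extract_dataclasses r

def bFinal (st : List String × List String × Nat) : List String :=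
  match st with
  | (result, buf, state) => if state != 0 then result ++ [PySem.Str.join "" buf] else result

theorem extract_dataclasses_cons_dc {line : String} {rest : List String}
    (h : pvIsDc line = true) :
    extract_dataclasses (line :: rest) = aHdr [line] rest := by
  rw [extract_dataclasses, aHdr]
  rcases h1 : aInner1 rest with ⟨p, r⟩
  cases r with
  | nil => simp [h]
  | cons c r2 =>
    rcases h2 : aInner2 r2 with ⟨b, r3⟩
    simp [h]

theorem extract_dataclasses_cons_not_dc {line : String} {rest : List String}
    (h : pvIsDc line = false) :
    extract_dataclasses (line :: rest) = extract_dataclasses rest := by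
  rw [extract_dataclasses]
  simp [h]

-- the three loop invariants of B's fold, proved together by induction on the remaining lines
theorem bFold_inv (l : List String) :
    (∀ res : List String, bFinal (l.foldl bStep (res, [], 0)) = res ++ extract_dataclasses l)
    ∧ (∀ res buf : List String, bFinal (l.foldl bStep (res, buf, 1)) = res ++ aHdr buf l)
    ∧ (∀ res buf : List String, bFinal (l.foldl bStep (res, buf, 2)) = res ++ aBody buf l) := by
  induction l with
  | nil =>
    refine ⟨fun res => by simp [bFinal, extract_dataclasses], fun res buf => ?_, fun res buf => ?_⟩
    · simp [bFinal, aHdr, aInner1]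
    · simp [bFinal, aBody, aInner2, extract_dataclasses]
  | cons x xs ih =>
    obtain ⟨ih0, ih1, ih2⟩ := ih
    refine ⟨fun res => ?_, fun res buf => ?_, fun res buf => ?_⟩
    · -- SEARCH state
      by_cases hdc : pvIsDc x = true
      · rw [List.foldl_cons,
          show bStep (res, [], 0) x = (res, [x], 1) by simp [bStep, pvIsDc] at hdc ⊢; simp [hdc],
          ih1, extract_dataclasses_cons_dc hdc]
      · rw [List.foldl_cons,
          show bStep (res, [], 0) x = (res, [], 0) by
            simp [bStep, pvIsDc] at hdc ⊢; simp [hdc],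
          ih0, extract_dataclasses_cons_not_dc (by simpa using hdc)]
    · -- HEADER state
      by_cases hc : pvIsClass x = true
      · rw [List.foldl_cons,
          show bStep (res, buf, 1) x = (res, buf ++ [x], 2) by
            simp [bStep, pvIsClass] at hc ⊢; simp [hc],
          ih2]
        rw [aHdr, show aInner1 (x :: xs) = ([], x :: xs) by rw [aInner1]; simp [hc]]
        rcases h2 : aInner2 xs with ⟨b, r3⟩
        simp [aBody, h2]
      · rw [List.foldl_cons,
          show bStep (res, buf, 1) x = (res, buf ++ [x], 1) by
            simp [bStep, pvIsClass] at hc ⊢; simp [hc],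
          ih1]
        rw [aHdr, aHdr]
        rcases h1 : aInner1 xs with ⟨p, r⟩
        rw [show aInner1 (x :: xs) = (x :: p, r) by rw [aInner1]; simp [hc, h1]]
        cases r with
        | nil => simp
        | cons c r2 =>
          rcases h2 : aInner2 r2 with ⟨b, r3⟩
          simp
    · -- BODY state
      by_cases hdc : pvIsDc x = true
      · rw [List.foldl_cons,
          show bStep (res, buf, 2) x = (res ++ [PySem.Str.join "" buf], [x], 1) by
            simp [bStep, pvIsDc] at hdc ⊢; simp [hdc],
          ih1]
        rw [aBody, show aInner2 (x :: xs) = ([], x :: xs) by rw [aInner2]; simp [hdc]]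
        simp [extract_dataclasses_cons_dc hdc]
      · by_cases hcl : (pvIsClass x && !pvIsClassMethod x) = true
        · rw [List.foldl_cons,
            show bStep (res, buf, 2) x = (res ++ [PySem.Str.join "" buf], [], 0) by
              simp [bStep, pvIsDc, pvIsClass, pvIsClassMethod] at hdc hcl ⊢
              simp [hdc, hcl.1, hcl.2],
            ih0]
          rw [aBody, show aInner2 (x :: xs) = ([], x :: xs) by rw [aInner2]; simp [hdc, hcl]]
          simp [extract_dataclasses_cons_not_dc (show pvIsDc x = false by simpa using hdc)]
        · rw [List.foldl_cons,
            show bStep (res, buf, 2) x = (res, buf ++ [x], 2) by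
              have hdc' : PySem.Str.startswith (PySem.Str.strip x) "@dataclass" = false := by
                simpa [pvIsDc] using hdc
              have hcl' : (PySem.Str.startswith (PySem.Str.strip x) "class "
                  && !PySem.Str.startswith (PySem.Str.strip x) "class method") = false := by
                simpa [pvIsClass, pvIsClassMethod] using hcl
              simp at hdc' hcl'
              simp [bStep, hdc']
              exact hcl',
            ih2]
          rcases h2 : aInner2 xs with ⟨b, r3⟩
          rw [aBody, aBody, h2,
            show aInner2 (x :: xs) = (x :: b, r3) by rw [aInner2]; simp [hdc, hcl, h2]]
          simp

-- ===== VERDICT (by name: the statement is the Claim_ definition above) =====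
theorem extract_dataclasses_spec : Claim_equal_extract_dataclasses := by
  intro lines _
  unfold Spec_extract_dataclasses extract_dataclasses_alt
  have h := (bFold_inv lines).1 []
  rcases hf : lines.foldl bStep ([], [], 0) with ⟨res, buf, st⟩
  rw [hf] at h
  simpa [bFinal] using h.symm
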